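-- pv_equiv track=rewrite | github.com/AhmedLTrovao/Containers_Multicompartimentados | Testes/Mariana.py | gerar_coordenadas_normais
-- ===== SOURCE A (Python) =====
-- def gerar_coordenadas_normais(dimensao_maxima, dimensoes_caixas):
--     """
--     Gera um conjunto de coordenadas otimizado ('normal patterns') para um único eixo.
--
--     Args:
--         dimensao_maxima (int): O tamanho do contêiner nesse eixo (L, W ou H).
--         dimensoes_caixas (list or set): Uma coleção com as dimensões únicas
--                                          das caixas para esse eixo (ex: todos os comprimentos).
--
--     Returns:
--         list: Uma lista ordenada de coordenadas permitidas.
--     """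
--
--     # 1. Comece com o ponto de origem. Usamos um 'set' para evitar duplicatas.
--     coordenadas = {0}
--
--     # 2. Itere sobre cada dimensão de caixa única.
--     for d in sorted(list(dimensoes_caixas)):
--         # Criamos uma cópia para adicionar os novos pontos, para não modificar o
--         # conjunto enquanto iteramos sobre ele.
--         novas_coordenadas_a_adicionar = set()
--
--         # Para cada coordenada que já encontramos...
--         for c in coordenadas:
--             # ...some múltiplos da dimensão atual.
--             novo_ponto = c + d
--             while novo_ponto <= dimensao_maxima:
--                 novas_coordenadas_a_adicionar.add(novo_ponto)
--                 novo_ponto += d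
--
--         # Adiciona todos os novos pontos encontrados ao nosso conjunto principal.
--         coordenadas.update(novas_coordenadas_a_adicionar)
--
--     # Uma pequena otimização final: remove pontos onde nem a menor caixa cabe.
--     if not dimensoes_caixas: return [0] # Evita erro se a lista for vazia
--     menor_dimensao = min(dimensoes_caixas)
--     coordenadas_finais = [c for c in coordenadas if c <= dimensao_maxima - menor_dimensao]
--
--     # Adiciona a coordenada 0 se ela não estiver na lista (caso especial)
--     if 0 not in coordenadas_finais:
--         coordenadas_finais.insert(0,0)
--
--     return sorted(coordenadas_finais)
-- ===== SOURCE B (Python) =====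
-- def gerar_coordenadas_normais(dimensao_maxima, dimensoes_caixas):
--     # Bottom-up reachability DP: reach[i] is True iff i is a sum of box dimensions <= i.
--     if not dimensoes_caixas:
--         return [0]
--     m = dimensao_maxima
--     reach = []
--     for i in range(m + 1):
--         reach.append(i == 0 or any(0 < d <= i and reach[i - d] for d in dimensoes_caixas))
--     limite = m - min(dimensoes_caixas)
--     res = [i for i in range(m + 1) if reach[i] and i <= limite]
--     if not res or res[0] != 0:
--         res.insert(0, 0)
--     return res
-- ===== Notes on version B (the rewrite author's own statement) =====
-- stated objective: faster
-- what changed: Replaces A's per-dimension set expansion (for every known coordinate, walk all multiples of each dimension) by a single bottom-up boolean reachability DP over 0..dimensao_maxima (classic coin-problem recurrence), reading the sorted result directly off the index order; intended as faster - a timing run saw A time out at n=16 where B returned, so no clean ratio could be measured.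
import Mathlib
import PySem

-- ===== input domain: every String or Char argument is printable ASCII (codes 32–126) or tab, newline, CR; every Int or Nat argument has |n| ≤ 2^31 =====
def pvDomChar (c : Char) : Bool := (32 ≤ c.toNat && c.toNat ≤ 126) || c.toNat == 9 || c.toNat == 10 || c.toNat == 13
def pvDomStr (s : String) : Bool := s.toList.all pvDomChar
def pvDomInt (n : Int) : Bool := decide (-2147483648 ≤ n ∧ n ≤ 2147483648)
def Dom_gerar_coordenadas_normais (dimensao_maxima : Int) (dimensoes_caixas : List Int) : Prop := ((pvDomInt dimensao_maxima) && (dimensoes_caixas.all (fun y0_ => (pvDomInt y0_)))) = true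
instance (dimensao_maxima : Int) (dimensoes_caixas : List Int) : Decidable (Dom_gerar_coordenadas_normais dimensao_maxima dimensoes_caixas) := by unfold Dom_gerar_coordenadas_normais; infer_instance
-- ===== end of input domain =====

-- B replaces A's per-dimension set expansion by a bottom-up boolean reachability DP over
-- 0..dimensao_maxima (intended as faster; a timing run saw A time out where B returned).

-- ===== PORT A =====
-- inner 'while novo_ponto <= dimensao_maxima: add(novo_ponto); novo_ponto += d'.
-- The '0 < d' conjunct is only a totality guard: with d ≤ 0 and novo ≤ m the Python
-- while-loop never terminates (such inputs are excluded by Pre_).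
def pvLoopA (m d : Int) (novo : Int) (acc : PySem.Set Int) : PySem.Set Int :=
  if 0 < d ∧ novo ≤ m then pvLoopA m d (novo + d) (PySem.Set.add acc novo) else acc
termination_by (m + 1 - novo).toNat
decreasing_by omega

-- one iteration of the outer 'for d in sorted(list(dimensoes_caixas))' body
def pvPassA (m d : Int) (coords : PySem.Set Int) : PySem.Set Int :=
  let novas := (coords : List Int).foldl (fun nv c => pvLoopA m d (c + d) nv) PySem.Set.empty
  PySem.Set.update coords novas

def gerar_coordenadas_normais (dimensao_maxima : Int) (dimensoes_caixas : List Int) : List Int :=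
  let coordenadas : PySem.Set Int := PySem.Set.ofList [0]
  let coordenadas := (PySem.List.sorted dimensoes_caixas (fun x => x)).foldl
      (fun cs d => pvPassA dimensao_maxima d cs) coordenadas
  if dimensoes_caixas = [] then [0]
  else
    match PySem.List.min? dimensoes_caixas (fun x => x) with
    | none => [0]  -- unreachable: the list is nonempty here
    | some menor =>
      let finais := (coordenadas : List Int).filter (fun c => decide (c ≤ dimensao_maxima - menor))
      let finais := if (0:Int) ∈ finais then finais else PySem.List.insert finais 0 0
      PySem.List.sorted finais (fun x => x)

-- ===== PORT B =====
def gerar_coordenadas_normais_alt (dimensao_maxima : Int) (dimensoes_caixas : List Int) : List Int :=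
  if dimensoes_caixas = [] then [0]
  else
    let m := dimensao_maxima
    let reach := (PySem.List.pyRange 0 (m + 1)).foldl
      (fun reach i =>
        reach ++ [decide (i = 0) ||
          dimensoes_caixas.any (fun d =>
            decide (0 < d) && decide (d ≤ i) &&
            -- reach[i - d]: always in range here, since 0 < d ≤ i and reach has i entries
            (PySem.List.pyGet? reach (i - d)).getD false)]) []
    match PySem.List.min? dimensoes_caixas (fun x => x) with
    | none => [0]  -- unreachable: the list is nonempty here
    | some menor =>
      let limite := m - menor
      let res := (PySem.List.pyRange 0 (m + 1)).filter
        (fun i => (PySem.List.pyGet? reach i).getD false && decide (i ≤ limite))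
      -- 'if not res or res[0] != 0: res.insert(0, 0)'
      if res.head? = some 0 then res else 0 :: res

-- ===== PRECONDITION & SPEC =====
-- Pre_ excludes exactly the inputs on which Python A never terminates: a dimension
-- d ≤ 0 with d ≤ dimensao_maxima makes the inner while-loop run forever.
def Pre_gerar_coordenadas_normais (dimensao_maxima : Int) (dimensoes_caixas : List Int) : Prop :=
  ∀ d ∈ dimensoes_caixas, 0 < d ∨ dimensao_maxima < d
instance (dimensao_maxima : Int) (dimensoes_caixas : List Int) : Decidable (Pre_gerar_coordenadas_normais dimensao_maxima dimensoes_caixas) := by unfold Pre_gerar_coordenadas_normais; infer_instance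

def pvWitness_gerar_coordenadas_normais : Int × List Int := (7, [2, 3])

def Spec_gerar_coordenadas_normais (dimensao_maxima : Int) (dimensoes_caixas : List Int) (out : List Int) : Prop := out = gerar_coordenadas_normais_alt dimensao_maxima dimensoes_caixas
instance (dimensao_maxima : Int) (dimensoes_caixas : List Int) (out : List Int) : Decidable (Spec_gerar_coordenadas_normais dimensao_maxima dimensoes_caixas out) := by unfold Spec_gerar_coordenadas_normais; infer_instance

-- ===== CLAIM (what is proved, stated in full; the proofs are below) =====
def Claim_equal_gerar_coordenadas_normais : Prop := ∀ (dimensao_maxima : Int) (dimensoes_caixas : List Int), Dom_gerar_coordenadas_normais dimensao_maxima dimensoes_caixas → Pre_gerar_coordenadas_normais dimensao_maxima dimensoes_caixas → Spec_gerar_coordenadas_normais dimensao_maxima dimensoes_caixas (gerar_coordenadas_normais dimensao_maxima dimensoes_caixas)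

-- ===== LEMMAS AND PROOFS =====

-- x is a coordinate reachable by stacking boxes: 0, or s + d ≤ m for a reachable s and a
-- positive dimension d. Both programs produce exactly {x reachable, x ≤ m - min} (plus 0).
inductive pvRch (m : Int) (dims : List Int) : Int → Prop
  | zero : pvRch m dims 0
  | step {s d : Int} : pvRch m dims s → d ∈ dims → 0 < d → s + d ≤ m → pvRch m dims (s + d)

theorem pvRch_nonneg {m : Int} {dims : List Int} {x : Int} (h : pvRch m dims x) : 0 ≤ x := by
  induction h with
  | zero => omega
  | step _ _ hd _ ih => omega

theorem pvRch_le {m : Int} {dims : List Int} {x : Int} (h : pvRch m dims x) : x = 0 ∨ x ≤ m := by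
  induction h with
  | zero => left; rfl
  | step _ _ _ hle _ => right; exact hle

theorem pvRch_iff {m : Int} {dims : List Int} {x : Int} (hx : x ≤ m) :
    pvRch m dims x ↔ x = 0 ∨ ∃ d ∈ dims, 0 < d ∧ d ≤ x ∧ pvRch m dims (x - d) := by
  constructor
  · intro h
    cases h with
    | zero => exact Or.inl rfl
    | step hs hmem hd hle =>
      rename_i s d
      refine Or.inr ⟨d, hmem, hd, ?_, ?_⟩
      · have := pvRch_nonneg hs; omega
      · simpa using hs
  · rintro (rfl | ⟨d, hmem, hd, hdx, hr⟩)
    · exact pvRch.zero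
    · have := pvRch.step hr hmem hd (show x - d + d ≤ m by omega)
      simpa using this

-- ---- B side: the DP array is pointwise the truth value of pvRch ----

-- classical truth value of reachability (proof-side only)
noncomputable def pvB (m : Int) (dims : List Int) (j : Int) : Bool :=
  @decide (pvRch m dims j) (Classical.propDecidable _)

theorem pvB_iff {m : Int} {dims : List Int} {j : Int} : pvB m dims j = true ↔ pvRch m dims j := by
  simp [pvB]

-- the body of B's reach-building loop
def pvBStep (dims : List Int) (reach : List Bool) (i : Int) : List Bool :=
  reach ++ [decide (i = 0) ||
    dims.any (fun d =>
      decide (0 < d) && decide (d ≤ i) &&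
      (PySem.List.pyGet? reach (i - d)).getD false)]

theorem pvBStep_entry (m : Int) (dims : List Int) (k : Nat) (hk : (k : Int) ≤ m) :
    pvBStep dims ((List.range k).map (fun j : Nat => pvB m dims (j : Int))) (k : Int)
      = (List.range (k + 1)).map (fun j : Nat => pvB m dims (j : Int)) := by
  have hlen : ((List.range k).map (fun j : Nat => pvB m dims (j : Int))).length = k := by simp
  have hget : ∀ d : Int, 0 < d → d ≤ (k : Int) →
      ((PySem.List.pyGet? ((List.range k).map (fun j : Nat => pvB m dims (j : Int))) ((k : Int) - d)).getD false
        = pvB m dims ((k : Int) - d)) := by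
    intro d hd hdk
    have h0 : 0 ≤ (k : Int) - d := by omega
    have hcast : ((k : Int) - d) = ((((k : Int) - d).toNat : Nat) : Int) := by omega
    have hlt : ((k : Int) - d).toNat < k := by omega
    rw [hcast, PySem.List.pyGet?_natCast]
    rw [List.getElem?_map, List.getElem?_range hlt]
    simp [← hcast]
  rw [List.range_succ, List.map_append]
  unfold pvBStep
  congr 1
  simp only [List.map_cons, List.map_nil]
  congr 1
  rw [Bool.eq_iff_iff]
  simp only [Bool.or_eq_true, decide_eq_true_eq, List.any_eq_true, Bool.and_eq_true]
  rw [pvB_iff, pvRch_iff hk]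
  constructor
  · rintro (h0 | ⟨d, hdmem, ⟨⟨hd, hdk⟩, hr⟩⟩)
    · exact Or.inl h0
    · refine Or.inr ⟨d, hdmem, hd, hdk, ?_⟩
      rw [hget d hd hdk] at hr
      exact pvB_iff.mp hr
  · rintro (h0 | ⟨d, hdmem, hd, hdk, hr⟩)
    · exact Or.inl h0
    · refine Or.inr ⟨d, hdmem, ⟨⟨hd, hdk⟩, ?_⟩⟩
      rw [hget d hd hdk]
      exact pvB_iff.mpr hr

theorem pvReachB (m : Int) (dims : List Int) :
    ∀ k : Nat, (k : Int) ≤ m + 1 →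
      (PySem.List.pyRange 0 (k : Int)).foldl (pvBStep dims) []
        = (List.range k).map (fun j : Nat => pvB m dims (j : Int)) := by
  intro k
  induction k with
  | zero =>
    intro _
    norm_num [PySem.List.pyRange]
  | succ k ih =>
    intro hk
    have hk' : (k : Int) ≤ m + 1 := by push_cast at hk ⊢; omega
    have hcast : ((k + 1 : Nat) : Int) = (k : Int) + 1 := by push_cast; ring
    rw [hcast, PySem.List.pyRange_one_succ_right (Int.natCast_nonneg k), List.foldl_append,
      ih hk', List.foldl_cons, List.foldl_nil]
    exact pvBStep_entry m dims k (by push_cast at hk; omega)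

-- ---- SumOf: t is a nonnegative combination of the (positive) elements of L ----

def pvSumOf : List Int → Int → Prop
  | [], t => t = 0
  | d :: L, t => ∃ (k : Nat) (t' : Int), pvSumOf L t' ∧ t = (k : Int) * d + t' ∧ (0 < d ∨ k = 0)

theorem pvSumOf_zero (L : List Int) : pvSumOf L 0 := by
  induction L with
  | nil => rfl
  | cons d L ih => exact ⟨0, 0, ih, by ring, Or.inr rfl⟩

theorem pvSumOf_nonneg : ∀ (L : List Int) (t : Int), pvSumOf L t → 0 ≤ t := by
  intro L
  induction L with
  | nil => intro t ht; simp [pvSumOf] at ht; omega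
  | cons d L ih =>
    rintro t ⟨k, t', ht', rfl, hdk⟩
    have h1 := ih t' ht'
    rcases hdk with hd | rfl
    · nlinarith [Int.natCast_nonneg k]
    · simp; omega

theorem pvSumOf_add_mem : ∀ (L : List Int) (d t : Int), d ∈ L → 0 < d → pvSumOf L t → pvSumOf L (t + d) := by
  intro L
  induction L with
  | nil => intro d t hm; simp at hm
  | cons h L ih =>
    rintro d t hm hd ⟨k, t', ht', rfl, hdk⟩
    rcases List.mem_cons.mp hm with rfl | hm'
    · exact ⟨k + 1, t', ht', by push_cast; ring, Or.inl hd⟩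
    · exact ⟨k, t' + d, ih d t' hm' hd ht', by ring, hdk⟩

theorem pvRch_sumOf {m : Int} {dims L : List Int} (hsub : ∀ d, d ∈ dims → d ∈ L) {x : Int}
    (h : pvRch m dims x) : pvSumOf L x := by
  induction h with
  | zero => exact pvSumOf_zero L
  | step _ hmem hd _ ih => exact pvSumOf_add_mem L _ _ (hsub _ hmem) hd ih

-- ---- A side: the fold of pvPassA over the dimensions realises exactly pvRch ----

theorem pvLoopA_subset {m d : Int} : ∀ (novo : Int) (acc : PySem.Set Int) (x : Int),
    x ∈ (acc : List Int) → x ∈ (pvLoopA m d novo acc : List Int) := by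
  intro novo acc
  induction novo, acc using pvLoopA.induct m d with
  | case1 novo acc h ih =>
    intro x hx
    rw [pvLoopA, if_pos h]
    exact ih x ((PySem.Set.mem_add acc novo x).mpr (Or.inl hx))
  | case2 novo acc h =>
    intro x hx
    rw [pvLoopA, if_neg h]
    exact hx

theorem pvLoopA_mem {m d : Int} (hd : 0 < d) : ∀ (j : Nat) (novo : Int) (acc : PySem.Set Int),
    novo + (j : Int) * d ≤ m → novo + (j : Int) * d ∈ (pvLoopA m d novo acc : List Int) := by
  intro j
  induction j with
  | zero =>
    intro novo acc h
    simp only [Nat.cast_zero, zero_mul, add_zero] at h ⊢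
    rw [pvLoopA, if_pos ⟨hd, h⟩]
    exact pvLoopA_subset _ _ _ ((PySem.Set.mem_add acc novo novo).mpr (Or.inr rfl))
  | succ j ih =>
    intro novo acc h
    have hjd : 0 ≤ (j : Int) * d := mul_nonneg (Int.natCast_nonneg j) (le_of_lt hd)
    have hcast : ((j + 1 : Nat) : Int) = (j : Int) + 1 := by push_cast; ring
    have heq : novo + ((j + 1 : Nat) : Int) * d = (novo + d) + (j : Int) * d := by
      rw [hcast]; ring
    have hle : novo ≤ m := by rw [heq] at h; omega
    rw [pvLoopA, if_pos ⟨hd, hle⟩, heq]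
    exact ih (novo + d) _ (by rw [heq] at h; exact h)

theorem pvLoopA_sound {m : Int} {dims : List Int} {d : Int} (hmem : d ∈ dims) :
    ∀ (novo : Int) (acc : PySem.Set Int), pvRch m dims (novo - d) →
      (∀ x ∈ (acc : List Int), pvRch m dims x) →
      ∀ x ∈ (pvLoopA m d novo acc : List Int), pvRch m dims x := by
  intro novo acc
  induction novo, acc using pvLoopA.induct m d with
  | case1 novo acc h ih =>
    intro hprev inv x hx
    rw [pvLoopA, if_pos h] at hx
    have hnovo : pvRch m dims novo := by
      have := pvRch.step hprev hmem h.1 (show novo - d + d ≤ m by omega)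
      simpa using this
    refine ih (by simpa using hnovo) (fun y hy => ?_) x hx
    rcases (PySem.Set.mem_add acc novo y).mp hy with h' | rfl
    · exact inv y h'
    · exact hnovo
  | case2 novo acc h =>
    intro _ inv x hx
    rw [pvLoopA, if_neg h] at hx
    exact inv x hx

theorem pvNovas_subset {m d : Int} : ∀ (l : List Int) (nv : PySem.Set Int) (x : Int),
    x ∈ (nv : List Int) →
    x ∈ (l.foldl (fun nv c => pvLoopA m d (c + d) nv) nv : List Int) := by
  intro l
  induction l with
  | nil => intro nv x hx; exact hx
  | cons c l ih => intro nv x hx; exact ih _ x (pvLoopA_subset _ _ _ hx)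

theorem pvPassA_subset {m d : Int} (coords : PySem.Set Int) (x : Int)
    (hx : x ∈ (coords : List Int)) : x ∈ (pvPassA m d coords : List Int) := by
  unfold pvPassA
  exact (PySem.Set.mem_update _ _ _).mpr (Or.inl hx)

theorem pvNovas_sound {m : Int} {dims : List Int} {d : Int} (hmem : d ∈ dims) :
    ∀ (l : List Int) (nv : PySem.Set Int), (∀ c ∈ l, pvRch m dims c) →
      (∀ y ∈ (nv : List Int), pvRch m dims y) →
      ∀ x ∈ (l.foldl (fun nv c => pvLoopA m d (c + d) nv) nv : List Int), pvRch m dims x := by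
  intro l
  induction l with
  | nil => intro nv _ inv; exact inv
  | cons c l ih =>
    intro nv hl inv
    refine ih _ (fun c' hc' => hl c' (List.mem_cons_of_mem _ hc')) ?_
    exact pvLoopA_sound hmem (c + d) nv (by simpa using hl c List.mem_cons_self) inv

theorem pvPassA_sound {m : Int} {dims : List Int} {d : Int} (hmem : d ∈ dims)
    (coords : PySem.Set Int) (inv : ∀ x ∈ (coords : List Int), pvRch m dims x) :
    ∀ x ∈ (pvPassA m d coords : List Int), pvRch m dims x := by
  intro x hx
  unfold pvPassA at hx
  rcases (PySem.Set.mem_update _ _ _).mp hx with h | h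
  · exact inv x h
  · exact pvNovas_sound hmem (coords : List Int) PySem.Set.empty inv (by simp [PySem.Set.empty]) x h

theorem pvNovas_mem {m d : Int} (hd : 0 < d) :
    ∀ (l : List Int) (nv : PySem.Set Int) (c : Int) (j : Nat), c ∈ l →
      (c + d) + (j : Int) * d ≤ m →
      (c + d) + (j : Int) * d ∈ (l.foldl (fun nv c => pvLoopA m d (c + d) nv) nv : List Int) := by
  intro l
  induction l with
  | nil => intro nv c j hc; simp at hc
  | cons a l ih =>
    intro nv c j hc hle
    rcases List.mem_cons.mp hc with rfl | hc'
    · exact pvNovas_subset l _ _ (pvLoopA_mem hd j (c + d) nv hle)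
    · exact ih _ c j hc' hle

theorem pvPassA_mem {m d : Int} (hd : 0 < d) (coords : PySem.Set Int) {c : Int}
    (hc : c ∈ (coords : List Int)) (k : Nat) (hk : k = 0 ∨ c + (k : Int) * d ≤ m) :
    c + (k : Int) * d ∈ (pvPassA m d coords : List Int) := by
  rcases k with _ | j
  · simpa using pvPassA_subset coords c hc
  · have hle : c + ((j + 1 : Nat) : Int) * d ≤ m := by
      rcases hk with h | h
      · exact absurd h (Nat.succ_ne_zero j)
      · exact h
    have heq : c + ((j + 1 : Nat) : Int) * d = (c + d) + (j : Int) * d := by push_cast; ring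
    unfold pvPassA
    refine (PySem.Set.mem_update _ _ _).mpr (Or.inr ?_)
    rw [heq]
    exact pvNovas_mem hd (coords : List Int) PySem.Set.empty c j hc (by rw [heq] at hle; exact hle)

theorem pvFoldA_sound {m : Int} {dims : List Int} :
    ∀ (L : List Int) (S : PySem.Set Int), (∀ d ∈ L, d ∈ dims) →
      (∀ x ∈ (S : List Int), pvRch m dims x) →
      ∀ x ∈ (L.foldl (fun cs d => pvPassA m d cs) S : List Int), pvRch m dims x := by
  intro L
  induction L with
  | nil => intro S _ inv; exact inv
  | cons d L ih =>
    intro S hL inv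
    exact ih _ (fun e he => hL e (List.mem_cons_of_mem _ he))
      (pvPassA_sound (hL d (List.mem_cons_self)) S inv)

theorem pvFoldA_complete {m : Int} :
    ∀ (L : List Int) (S : PySem.Set Int) (c t : Int), c ∈ (S : List Int) → 0 ≤ c →
      pvSumOf L t → (t = 0 ∨ c + t ≤ m) →
      c + t ∈ (L.foldl (fun cs d => pvPassA m d cs) S : List Int) := by
  intro L
  induction L with
  | nil =>
    rintro S c t hc _ ht hcond
    have : t = 0 := ht
    subst this
    simpa using hc
  | cons d L ih =>
    rintro S c t hc hc0 ⟨k, t', ht', rfl, hdk⟩ hcond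
    have ht'0 : 0 ≤ t' := pvSumOf_nonneg L t' ht'
    have hkd0 : 0 ≤ (k : Int) * d := by
      rcases hdk with hd | rfl
      · exact mul_nonneg (Int.natCast_nonneg k) (le_of_lt hd)
      · simp
    have hc' : c + (k : Int) * d ∈ (pvPassA m d S : List Int) := by
      rcases Nat.eq_zero_or_pos k with rfl | hkpos
      · simpa using pvPassA_subset S c hc
      · have hd : 0 < d := by
          rcases hdk with hd | rfl
          · exact hd
          · exact absurd rfl (Nat.pos_iff_ne_zero.mp hkpos)
        have hkd1 : 0 < (k : Int) * d := by
          have : (0:Int) < (k : Int) := by exact_mod_cast hkpos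
          exact mul_pos this hd
        have : c + (k : Int) * d ≤ m := by
          rcases hcond with h0 | hle
          · omega
          · omega
        exact pvPassA_mem hd S hc k (Or.inr this)
    have hfin := ih (pvPassA m d S) (c + (k : Int) * d) t' hc' (by omega) ht' ?side
    · have : c + ((k : Int) * d + t') = (c + (k : Int) * d) + t' := by ring
      rw [List.foldl_cons, this]
      exact hfin
    · rcases eq_or_lt_of_le ht'0 with rfl | ht'pos
      · exact Or.inl rfl
      · refine Or.inr ?_
        rcases hcond with h0 | hle
        · omega
        · omega

theorem pvFoldA_nodup {m : Int} : ∀ (L : List Int) (S : PySem.Set Int),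
    (S : List Int).Nodup → (L.foldl (fun cs d => pvPassA m d cs) S : List Int).Nodup := by
  intro L
  induction L with
  | nil => intro S h; exact h
  | cons d L ih =>
    intro S h
    exact ih _ (PySem.Set.nodup_update _ _ h)

theorem pvSA_mem (m : Int) (dims : List Int) (x : Int) :
    x ∈ (((PySem.List.sorted dims (fun x => x)).foldl (fun cs d => pvPassA m d cs)
        (PySem.Set.ofList [0])) : List Int) ↔ pvRch m dims x := by
  constructor
  · intro hx
    refine pvFoldA_sound _ _ (fun d hd => ?_) (fun y hy => ?_) x hx
    · exact (PySem.List.sorted_perm dims (fun x => x) false).mem_iff.mp hd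
    · have : y = 0 := by simpa using (PySem.Set.mem_ofList _ _).mp hy
      subst this; exact pvRch.zero
  · intro hx
    have hsum : pvSumOf (PySem.List.sorted dims (fun x => x)) x :=
      pvRch_sumOf (fun d hd => (PySem.List.sorted_perm dims (fun x => x) false).mem_iff.mpr hd) hx
    have h0 : (0:Int) ∈ ((PySem.Set.ofList [0] : PySem.Set Int) : List Int) := by
      simp [PySem.Set.mem_ofList]
    have hcond : x = 0 ∨ (0:Int) + x ≤ m := by rcases pvRch_le hx with h | h <;> omega
    have := pvFoldA_complete _ _ 0 x h0 le_rfl hsum hcond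
    simpa using this

-- PySem.List.insert xs 0 v = v :: xs (list.insert(0, v))
theorem pvInsert_zero (xs : List Int) (v : Int) : PySem.List.insert xs 0 v = v :: xs := by
  simp [PySem.List.insert, PySem.List.sliceIndices]

-- ===== VERDICT (by name: the statement is the Claim_ definition above) =====
theorem gerar_coordenadas_normais_spec : Claim_equal_gerar_coordenadas_normais := by
  intro m dims _ hpre
  unfold Spec_gerar_coordenadas_normais gerar_coordenadas_normais gerar_coordenadas_normais_alt
  by_cases hnil : dims = []
  · simp [hnil]
  · simp only [if_neg hnil]
    obtain ⟨menor, hmin⟩ : ∃ menor, PySem.List.min? dims (fun x => x) = some menor := by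
      cases h : PySem.List.min? dims (fun x => x) with
      | none => exact absurd ((PySem.List.min?_eq_none_iff dims (fun x => x)).mp h) hnil
      | some menor => exact ⟨menor, rfl⟩
    simp only [hmin]
    have hstep : (fun (reach : List Bool) (i : Int) => reach ++ [decide (i = 0) ||
        dims.any (fun d => decide (0 < d) && decide (d ≤ i) &&
          (PySem.List.pyGet? reach (i - d)).getD false)]) = pvBStep dims := rfl
    rw [hstep]
    set SA : PySem.Set Int := (PySem.List.sorted dims (fun x => x)).foldl
        (fun cs d => pvPassA m d cs) (PySem.Set.ofList [0]) with hSAdef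
    have hSA : ∀ x : Int, x ∈ (SA : List Int) ↔ pvRch m dims x := pvSA_mem m dims
    have hnodupSA : (SA : List Int).Nodup := pvFoldA_nodup _ _ (PySem.Set.nodup_ofList _)
    set reach : List Bool := (PySem.List.pyRange 0 (m + 1)).foldl (pvBStep dims) [] with hreachdef
    have hreach : reach = (List.range (m + 1).toNat).map (fun j : Nat => pvB m dims (j : Int)) := by
      by_cases hm : 0 ≤ m + 1
      · have := pvReachB m dims (m + 1).toNat (by omega)
        rw [Int.toNat_of_nonneg hm] at this
        exact this
      · have h1 : PySem.List.pyRange 0 (m + 1) = [] := by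
          rw [List.eq_nil_iff_forall_not_mem]
          intro x hx
          have := PySem.List.mem_pyRange_one.mp hx
          omega
        have h2 : (m + 1).toNat = 0 := by omega
        rw [hreachdef, h1, h2]
        simp
    have hgetreach : ∀ x : Int, 0 ≤ x → x < m + 1 →
        (PySem.List.pyGet? reach x).getD false = pvB m dims x := by
      intro x h0 hlt
      have hcast : x = ((x.toNat : Nat) : Int) := by omega
      have hlt' : x.toNat < (m + 1).toNat := by omega
      rw [hreach, hcast, PySem.List.pyGet?_natCast, List.getElem?_map, List.getElem?_range hlt']
      simp [← hcast]
    set res : List Int := (PySem.List.pyRange 0 (m + 1)).filter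
        (fun i => (PySem.List.pyGet? reach i).getD false && decide (i ≤ m - menor)) with hresdef
    have hres : ∀ x : Int, x ∈ res ↔ pvRch m dims x ∧ x ≤ m - menor := by
      intro x
      constructor
      · intro hx
        obtain ⟨hxr, hxp⟩ := List.mem_filter.mp hx
        obtain ⟨hx0, hxlt⟩ := PySem.List.mem_pyRange_one.mp hxr
        simp only [Bool.and_eq_true] at hxp
        obtain ⟨hb, hd⟩ := hxp
        rw [hgetreach x hx0 hxlt] at hb
        exact ⟨pvB_iff.mp hb, by simpa using hd⟩
      · rintro ⟨hr, hle⟩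
        have hx0 : 0 ≤ x := pvRch_nonneg hr
        have hxlt : x < m + 1 := by
          rcases pvRch_le hr with rfl | h
          · have hmem : menor ∈ dims := PySem.List.min?_mem hmin
            rcases hpre menor hmem with h1 | h1 <;> omega
          · omega
        refine List.mem_filter.mpr ⟨PySem.List.mem_pyRange_one.mpr ⟨hx0, hxlt⟩, ?_⟩
        simp only [Bool.and_eq_true, hgetreach x hx0 hxlt]
        exact ⟨pvB_iff.mpr hr, by simpa using hle⟩
    have hpwres : res.Pairwise (· < ·) :=
      List.Pairwise.filter _ (PySem.List.pairwise_lt_pyRange_one 0 (m + 1))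
    have hndres : res.Nodup := hpwres.imp (fun h => ne_of_lt h)
    set finais : List Int := (SA : List Int).filter (fun c => decide (c ≤ m - menor)) with hfindef
    have hfin : ∀ x : Int, x ∈ finais ↔ pvRch m dims x ∧ x ≤ m - menor := by
      intro x
      rw [hfindef, List.mem_filter, hSA]
      simp
    have hnodupf : finais.Nodup := hnodupSA.filter _
    have hfr : ∀ x : Int, x ∈ res ↔ x ∈ finais := fun x => (hres x).trans (hfin x).symm
    have h0res : (0 : Int) ∈ res → res.head? = some 0 := by
      intro h0
      cases hr : res with
      | nil => rw [hr] at h0; simp at h0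
      | cons a t =>
        rw [hr] at h0 hpwres
        rcases List.mem_cons.mp h0 with h | h
        · simp [← h]
        · have ha : a ∈ res := by rw [hr]; exact List.mem_cons_self
          have h0a : 0 ≤ a := pvRch_nonneg ((hres a).mp ha).1
          have := (List.pairwise_cons.mp hpwres).1 0 h
          omega
    by_cases h0 : (0 : Int) ∈ finais
    · have h0r : (0 : Int) ∈ res := (hfr 0).mpr h0
      rw [if_pos h0, if_pos (h0res h0r)]
      exact PySem.List.sorted_eq_of_perm_of_pairwise_lt finais res (fun x => x)
        ((List.perm_ext_iff_of_nodup hndres hnodupf).mpr hfr) hpwres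
    · have h0r : (0 : Int) ∉ res := fun h => h0 ((hfr 0).mp h)
      have hhead : ¬ res.head? = some 0 := fun h =>
        h0r (List.mem_of_mem_head? (Option.mem_def.mpr h))
      rw [if_neg h0, if_neg hhead, pvInsert_zero]
      have hperm : (0 :: res).Perm (0 :: finais) :=
        ((List.perm_ext_iff_of_nodup hndres hnodupf).mpr hfr).cons 0
      have hpw : (0 :: res).Pairwise (· < ·) := by
        refine List.pairwise_cons.mpr ⟨fun y hy => ?_, hpwres⟩
        have h0y : 0 ≤ y := pvRch_nonneg ((hres y).mp hy).1
        have : y ≠ 0 := fun hz => h0r (hz ▸ hy)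
        omega
      exact PySem.List.sorted_eq_of_perm_of_pairwise_lt (0 :: finais) (0 :: res) (fun x => x)
        hperm hpw
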